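-- pv_equiv track=rewrite | github.com/Pattyboi101/oats-autonomous-agents | agents/build_in_public.py | extract_playbook_gotchas
-- ===== SOURCE A (Python) =====
-- def extract_playbook_gotchas(text: str) -> list[str]:
--     """Pull GOTCHA entries from playbook."""
--     gotchas = []
--     in_gotcha = False
--     current = []
--     for line in text.splitlines():
--         if line.startswith("## GOTCHA:"):
--             if current:
--                 gotchas.append(" ".join(current))
--             current = [line.replace("## GOTCHA:", "").strip()]
--             in_gotcha = True
--         elif in_gotcha:
--             if line.startswith("## "):
--                 in_gotcha = False
--                 if current:
--                     gotchas.append(" ".join(current))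
--                 current = []
--             elif line.strip():
--                 current.append(line.strip())
--     if current:
--         gotchas.append(" ".join(current))
--     return gotchas
-- ===== SOURCE B (Python) =====
-- def extract_playbook_gotchas(text: str) -> list[str]:
--     """Pull GOTCHA entries from playbook (two-pass: group into blocks, then filter/map)."""
--     # Pass 1: group lines into '## '-headed blocks; lines before the first header are dropped.
--     blocks = []
--     cur = None
--     for line in text.splitlines():
--         if line.startswith("## "):
--             if cur is not None:
--                 blocks.append(cur)
--             cur = [line]
--         elif cur is not None:
--             cur.append(line)
--     if cur is not None:
--         blocks.append(cur)
--     # Pass 2: keep GOTCHA blocks, joining the header remainder with stripped non-blank body lines.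
--     result = []
--     for block in blocks:
--         if block[0].startswith("## GOTCHA:"):
--             parts = [block[0].replace("## GOTCHA:", "").strip()]
--             for line in block[1:]:
--                 if line.strip():
--                     parts.append(line.strip())
--             result.append(" ".join(parts))
--     return result
-- ===== Notes on version B (the rewrite author's own statement) =====
-- stated objective: simpler
-- what changed: Replaced A's single interleaved state machine (in_gotcha flag, current buffer, flushes at three different points) by two plain passes: group lines into '## '-headed blocks, then filter the GOTCHA blocks and join each header remainder with its stripped non-blank body lines.
import Mathlib
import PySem

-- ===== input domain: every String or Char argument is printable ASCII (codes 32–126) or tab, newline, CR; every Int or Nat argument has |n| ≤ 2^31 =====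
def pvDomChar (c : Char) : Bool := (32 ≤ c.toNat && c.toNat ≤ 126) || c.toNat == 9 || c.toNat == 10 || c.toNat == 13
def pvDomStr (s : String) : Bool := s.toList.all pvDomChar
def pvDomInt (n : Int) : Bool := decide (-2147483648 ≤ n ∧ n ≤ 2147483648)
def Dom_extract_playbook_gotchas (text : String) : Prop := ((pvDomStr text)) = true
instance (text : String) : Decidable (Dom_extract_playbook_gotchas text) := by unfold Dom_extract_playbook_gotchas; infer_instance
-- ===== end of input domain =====

-- B replaces A's interleaved state machine by two passes (group lines into '## '-headed
-- blocks, then filter/map the GOTCHA blocks); same cost, simpler decomposition.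

-- ===== PORT A =====
-- loop state: (gotchas, in_gotcha, current)
def pvAStep (st : List String × Bool × List String) (line : String) :
    List String × Bool × List String :=
  if PySem.Str.startswith line "## GOTCHA:" then
    ((if st.2.2 ≠ [] then st.1 ++ [PySem.Str.join " " st.2.2] else st.1), true,
      [PySem.Str.strip (PySem.Str.replace line "## GOTCHA:" "")])
  else if st.2.1 then
    if PySem.Str.startswith line "## " then
      ((if st.2.2 ≠ [] then st.1 ++ [PySem.Str.join " " st.2.2] else st.1), false, [])
    else if PySem.Str.strip line ≠ "" then
      (st.1, st.2.1, st.2.2 ++ [PySem.Str.strip line])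
    else st
  else st

def extract_playbook_gotchas (text : String) : List String :=
  let st := (PySem.Str.splitlines text).foldl pvAStep ([], false, [])
  if st.2.2 ≠ [] then st.1 ++ [PySem.Str.join " " st.2.2] else st.1

-- ===== PORT B =====
-- pass 1 state: (blocks, cur); cur = none before the first '## ' header
def pvBGroup (st : List (List String) × Option (List String)) (line : String) :
    List (List String) × Option (List String) :=
  if PySem.Str.startswith line "## " then
    ((match st.2 with | some c => st.1 ++ [c] | none => st.1), some [line])
  else
    match st.2 with
    | some c => (st.1, some (c ++ [line]))
    | none => st

-- body of pass 2's inner loop: append stripped non-blank lines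
def pvBody (ps : List String) (line : String) : List String :=
  if PySem.Str.strip line ≠ "" then ps ++ [PySem.Str.strip line] else ps

-- pass 2: one block → appended entry if it is a GOTCHA block
-- (blocks produced by pass 1 are never empty; the [] branch mirrors Source B vacuously)
def pvBStep (res : List String) (block : List String) : List String :=
  match block with
  | [] => res
  | h :: t =>
    if PySem.Str.startswith h "## GOTCHA:" then
      res ++ [PySem.Str.join " "
        (t.foldl pvBody [PySem.Str.strip (PySem.Str.replace h "## GOTCHA:" "")])]
    else res

def extract_playbook_gotchas_alt (text : String) : List String :=
  let st := (PySem.Str.splitlines text).foldl pvBGroup ([], none)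
  let blocks := match st.2 with | some c => st.1 ++ [c] | none => st.1
  blocks.foldl pvBStep []

-- ===== PRECONDITION & SPEC =====
def Spec_extract_playbook_gotchas (text : String) (out : List String) : Prop := out = extract_playbook_gotchas_alt text
instance (text : String) (out : List String) : Decidable (Spec_extract_playbook_gotchas text out) := by unfold Spec_extract_playbook_gotchas; infer_instance

-- ===== CLAIM (what is proved, stated in full; the proofs are below) =====
def Claim_equal_extract_playbook_gotchas : Prop := ∀ (text : String), Dom_extract_playbook_gotchas text → Spec_extract_playbook_gotchas text (extract_playbook_gotchas text)

-- ===== LEMMAS AND PROOFS =====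

-- '## GOTCHA:' headers are '## ' headers
theorem pvG_imp_H {l : String} (h : PySem.Str.startswith l "## GOTCHA:" = true) :
    PySem.Str.startswith l "## " = true := by
  simp only [PySem.Str.startswith_eq, PySem.Chars.startswith_iff] at h ⊢
  exact List.IsPrefix.trans (by decide) h

theorem pvBody_foldl_init (t : List String) (init : List String) :
    t.foldl pvBody init = init ++ t.foldl pvBody [] := by
  induction t generalizing init with
  | nil => simp
  | cons a t ih =>
    simp only [List.foldl_cons]
    rw [ih (pvBody init a), ih (pvBody [] a)]
    simp only [pvBody]; split <;> simp

theorem pvBody_foldl_append_blank (t : List String) (l : String)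
    (hs : PySem.Str.strip l = "") :
    (t ++ [l]).foldl pvBody [] = t.foldl pvBody [] := by
  rw [List.foldl_append]
  simp only [List.foldl_cons, List.foldl_nil, pvBody]
  rw [if_neg (by simp [hs])]

theorem pvBody_foldl_append_nonblank (t : List String) (l : String)
    (hs : ¬ PySem.Str.strip l = "") :
    (t ++ [l]).foldl pvBody [] = t.foldl pvBody [] ++ [PySem.Str.strip l] := by
  rw [List.foldl_append]
  simp only [List.foldl_cons, List.foldl_nil, pvBody]
  rw [if_pos hs]

-- the simulation invariant between A's state and B's pass-1 state
def pvInv (sa : List String × Bool × List String)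
    (sb : List (List String) × Option (List String)) : Prop :=
  sa.1 = sb.1.foldl pvBStep [] ∧
  (match sb.2 with
   | none => sa.2.1 = false ∧ sa.2.2 = []
   | some c => ∃ h t, c = h :: t ∧ PySem.Str.startswith h "## " = true ∧
       (if PySem.Str.startswith h "## GOTCHA:" = true then
          sa.2.1 = true ∧
          sa.2.2 = PySem.Str.strip (PySem.Str.replace h "## GOTCHA:" "") :: t.foldl pvBody []
        else sa.2.1 = false ∧ sa.2.2 = []))

theorem pvClose_gotcha (bs : List (List String)) (h : String) (t : List String)
    (hg : PySem.Str.startswith h "## GOTCHA:" = true) :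
    (bs ++ [h :: t]).foldl pvBStep [] =
      bs.foldl pvBStep [] ++
        [PySem.Str.join " "
          (PySem.Str.strip (PySem.Str.replace h "## GOTCHA:" "") :: t.foldl pvBody [])] := by
  rw [List.foldl_append]
  simp only [List.foldl_cons, List.foldl_nil, pvBStep]
  rw [if_pos hg, pvBody_foldl_init t]
  rfl

theorem pvClose_non (bs : List (List String)) (h : String) (t : List String)
    (hg : ¬ PySem.Str.startswith h "## GOTCHA:" = true) :
    (bs ++ [h :: t]).foldl pvBStep [] = bs.foldl pvBStep [] := by
  rw [List.foldl_append]
  simp only [List.foldl_cons, List.foldl_nil, pvBStep]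
  rw [if_neg hg]

theorem pvInv_step (sa : List String × Bool × List String)
    (sb : List (List String) × Option (List String)) (l : String)
    (hinv : pvInv sa sb) : pvInv (pvAStep sa l) (pvBGroup sb l) := by
  obtain ⟨g, ing, cur⟩ := sa
  obtain ⟨bs, oc⟩ := sb
  obtain ⟨hg, hc⟩ := hinv
  simp only at hg hc
  by_cases hG : PySem.Str.startswith l "## GOTCHA:" = true
  · -- a '## GOTCHA:' header line: both sides open a fresh GOTCHA block
    have hH := pvG_imp_H hG
    have hA : pvAStep (g, ing, cur) l =
        ((if cur ≠ [] then g ++ [PySem.Str.join " " cur] else g), true,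
          [PySem.Str.strip (PySem.Str.replace l "## GOTCHA:" "")]) := by
      simp only [pvAStep]; rw [if_pos hG]
    have hB : pvBGroup (bs, oc) l =
        ((match oc with | some c => bs ++ [c] | none => bs), some [l]) := by
      cases oc <;> (simp only [pvBGroup]; rw [if_pos hH])
    rw [hA, hB]
    refine ⟨?_, ⟨l, [], rfl, hH, ?_⟩⟩
    · cases oc with
      | none =>
        obtain ⟨_, hcur⟩ := hc
        simp only [hcur, ne_eq, not_true_eq_false, if_false]
        exact hg
      | some c =>
        obtain ⟨h, t, hct, hhH, hrest⟩ := hc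
        subst hct
        by_cases hhG : PySem.Str.startswith h "## GOTCHA:" = true
        · rw [if_pos hhG] at hrest
          rw [pvClose_gotcha bs h t hhG, ← hg, hrest.2,
            if_pos (List.cons_ne_nil _ _)]
        · rw [if_neg hhG] at hrest
          rw [pvClose_non bs h t hhG, ← hg, hrest.2, if_neg (by simp)]
    · rw [if_pos hG]; exact ⟨rfl, rfl⟩
  · by_cases hH : PySem.Str.startswith l "## " = true
    · -- a non-GOTCHA '## ' header: A leaves gotcha mode, B opens a non-GOTCHA block
      have hB : pvBGroup (bs, oc) l =
          ((match oc with | some c => bs ++ [c] | none => bs), some [l]) := by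
        cases oc <;> (simp only [pvBGroup]; rw [if_pos hH])
      rw [hB]
      cases oc with
      | none =>
        obtain ⟨hing, hcur⟩ := hc
        subst hing; subst hcur
        have hA : pvAStep (g, false, []) l = (g, false, []) := by
          simp only [pvAStep]; rw [if_neg hG]; simp
        rw [hA]
        exact ⟨hg, ⟨l, [], rfl, hH, by rw [if_neg hG]; exact ⟨rfl, rfl⟩⟩⟩
      | some c =>
        obtain ⟨h, t, hct, hhH, hrest⟩ := hc
        subst hct
        by_cases hhG : PySem.Str.startswith h "## GOTCHA:" = true
        · rw [if_pos hhG] at hrest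
          obtain ⟨hing, hcur⟩ := hrest
          subst hing; subst hcur
          have hA : pvAStep (g, true,
                PySem.Str.strip (PySem.Str.replace h "## GOTCHA:" "") :: t.foldl pvBody []) l =
              (g ++ [PySem.Str.join " "
                (PySem.Str.strip (PySem.Str.replace h "## GOTCHA:" "") :: t.foldl pvBody [])],
               false, []) := by
            simp only [pvAStep]
            rw [if_neg hG]
            simp only [if_true]
            rw [if_pos hH, if_pos (List.cons_ne_nil _ _)]
          rw [hA]
          refine ⟨?_, ⟨l, [], rfl, hH, by rw [if_neg hG]; exact ⟨rfl, rfl⟩⟩⟩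
          rw [pvClose_gotcha bs h t hhG, ← hg]
        · rw [if_neg hhG] at hrest
          obtain ⟨hing, hcur⟩ := hrest
          subst hing; subst hcur
          have hA : pvAStep (g, false, []) l = (g, false, []) := by
            simp only [pvAStep]; rw [if_neg hG]; simp
          rw [hA]
          refine ⟨?_, ⟨l, [], rfl, hH, by rw [if_neg hG]; exact ⟨rfl, rfl⟩⟩⟩
          rw [pvClose_non bs h t hhG, ← hg]
    · -- a body line
      have hB : pvBGroup (bs, oc) l =
          (bs, (match oc with | some c => some (c ++ [l]) | none => oc)) := by
        simp only [pvBGroup]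
        rw [if_neg hH]
        cases oc <;> rfl
      rw [hB]
      cases oc with
      | none =>
        obtain ⟨hing, hcur⟩ := hc
        subst hing; subst hcur
        have hA : pvAStep (g, false, []) l = (g, false, []) := by
          simp only [pvAStep]; rw [if_neg hG]; simp
        rw [hA]
        exact ⟨hg, rfl, rfl⟩
      | some c =>
        obtain ⟨h, t, hct, hhH, hrest⟩ := hc
        subst hct
        by_cases hhG : PySem.Str.startswith h "## GOTCHA:" = true
        · rw [if_pos hhG] at hrest
          obtain ⟨hing, hcur⟩ := hrest
          subst hing; subst hcur
          by_cases hs : PySem.Str.strip l = ""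
          · have hA : pvAStep (g, true,
                PySem.Str.strip (PySem.Str.replace h "## GOTCHA:" "") :: t.foldl pvBody []) l = (g, true,
                PySem.Str.strip (PySem.Str.replace h "## GOTCHA:" "") :: t.foldl pvBody []) := by
              simp only [pvAStep]
              rw [if_neg hG]
              simp only [if_true]
              rw [if_neg hH, if_neg (by simp [hs])]
            rw [hA]
            refine ⟨hg, ⟨h, t ++ [l], by simp, hhH, ?_⟩⟩
            rw [if_pos hhG, pvBody_foldl_append_blank t l hs]
            exact ⟨rfl, rfl⟩
          · have hA : pvAStep (g, true,
                PySem.Str.strip (PySem.Str.replace h "## GOTCHA:" "") :: t.foldl pvBody []) l = (g, true,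
                (PySem.Str.strip (PySem.Str.replace h "## GOTCHA:" "") :: t.foldl pvBody [])
                  ++ [PySem.Str.strip l]) := by
              simp only [pvAStep]
              rw [if_neg hG]
              simp only [if_true]
              rw [if_neg hH, if_pos hs]
            rw [hA]
            refine ⟨hg, ⟨h, t ++ [l], by simp, hhH, ?_⟩⟩
            rw [if_pos hhG, pvBody_foldl_append_nonblank t l hs]
            exact ⟨rfl, rfl⟩
        · rw [if_neg hhG] at hrest
          obtain ⟨hing, hcur⟩ := hrest
          subst hing; subst hcur
          have hA : pvAStep (g, false, []) l = (g, false, []) := by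
            simp only [pvAStep]; rw [if_neg hG]; simp
          rw [hA]
          refine ⟨hg, ⟨h, t ++ [l], by simp, hhH, ?_⟩⟩
          rw [if_neg hhG]
          exact ⟨rfl, rfl⟩

theorem pvInv_foldl (ls : List String) (sa : List String × Bool × List String)
    (sb : List (List String) × Option (List String)) (hinv : pvInv sa sb) :
    pvInv (ls.foldl pvAStep sa) (ls.foldl pvBGroup sb) := by
  induction ls generalizing sa sb with
  | nil => exact hinv
  | cons l ls ih => exact ih _ _ (pvInv_step sa sb l hinv)

theorem pvInv_final (sa : List String × Bool × List String)
    (sb : List (List String) × Option (List String)) (hinv : pvInv sa sb) :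
    (if sa.2.2 ≠ [] then sa.1 ++ [PySem.Str.join " " sa.2.2] else sa.1) =
      (match sb.2 with | some c => sb.1 ++ [c] | none => sb.1).foldl pvBStep [] := by
  obtain ⟨g, ing, cur⟩ := sa
  obtain ⟨bs, oc⟩ := sb
  obtain ⟨hg, hc⟩ := hinv
  simp only at hg hc ⊢
  cases oc with
  | none =>
    obtain ⟨_, hcur⟩ := hc
    subst hcur
    simp only [ne_eq, not_true_eq_false, if_false]
    exact hg
  | some c =>
    obtain ⟨h, t, hct, hhH, hrest⟩ := hc
    subst hct
    by_cases hhG : PySem.Str.startswith h "## GOTCHA:" = true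
    · rw [if_pos hhG] at hrest
      rw [pvClose_gotcha bs h t hhG, ← hg, hrest.2, if_pos (List.cons_ne_nil _ _)]
    · rw [if_neg hhG] at hrest
      rw [pvClose_non bs h t hhG, ← hg, hrest.2, if_neg (by simp)]

-- ===== VERDICT (by name: the statement is the Claim_ definition above) =====
theorem extract_playbook_gotchas_spec : Claim_equal_extract_playbook_gotchas := by
  intro text _
  unfold Spec_extract_playbook_gotchas extract_playbook_gotchas extract_playbook_gotchas_alt
  exact pvInv_final _ _ (pvInv_foldl (PySem.Str.splitlines text) ([], false, []) ([], none)
    ⟨rfl, rfl, rfl⟩)
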